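-- pv_equiv track=rewrite | github.com/jcraig949jfi/Prometheus | cartography/v2/genus2_phase_coherence.py | _count_Fp2_char2
-- ===== SOURCE A (Python) =====
-- def _count_Fp2_char2(f_coeffs, h_coeffs):
--     """Count points over GF(4) for p=2.
--     GF(4) = {0, 1, w, w+1} where w^2 + w + 1 = 0.
--     Elements as (a, b) meaning a + b*w, arithmetic mod 2 with w^2 = w + 1.
--     """
--     count = 0
--     elements = [(a, b) for a in range(2) for b in range(2)]
--
--     for xa, xb in elements:
--         fx_a, fx_b = _eval_poly_GF4(f_coeffs, xa, xb)
--         hx_a, hx_b = _eval_poly_GF4(h_coeffs, xa, xb) if h_coeffs else (0, 0)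
--
--         # Solve y^2 + h(x)*y = f(x) in GF(4)
--         # In char 2: y^2 + hx*y + fx = 0  (since -1=1)
--         for ya, yb in elements:
--             # y^2 in GF(4): (a+bw)^2 = a^2 + b^2*w^2 = a + b*(w+1) = (a+b) + b*w  (mod 2)
--             y2_a = (ya + yb) % 2
--             y2_b = yb
--             # hx * y
--             hy_a = (hx_a * ya + hx_b * yb) % 2  # real part (with w^2=w+1)
--             hy_b = (hx_a * yb + hx_b * ya + hx_b * yb) % 2
--             # y^2 + hx*y + fx
--             res_a = (y2_a + hy_a + fx_a) % 2
--             res_b = (y2_b + hy_b + fx_b) % 2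
--             if res_a == 0 and res_b == 0:
--                 count += 1
--
--     # Infinity points for GF(4) - simplified
--     deg_f = len(f_coeffs) - 1 if f_coeffs else 0
--     while deg_f >= 0 and f_coeffs[deg_f] == 0:
--         deg_f -= 1
--     if deg_f == 5:
--         count += 1
--     elif deg_f == 6:
--         count += 2  # both infinite points rational over GF(4)
--
--     return count
--
-- def _eval_poly_GF4(coeffs, xa, xb):
--     """Evaluate polynomial at (xa, xb) in GF(4) = F_2[w]/(w^2+w+1)."""
--     val_a, val_b = 0, 0
--     pow_a, pow_b = 1, 0
--     for c in coeffs: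
--         c2 = c % 2
--         val_a = (val_a + c2 * pow_a) % 2
--         val_b = (val_b + c2 * pow_b) % 2
--         # multiply power by x:  (pa+pb*w)(xa+xb*w)
--         # = pa*xa + (pa*xb+pb*xa)*w + pb*xb*w^2
--         # = pa*xa + pb*xb + (pa*xb + pb*xa + pb*xb)*w   [since w^2=w+1]
--         new_a = (pow_a * xa + pow_b * xb) % 2
--         new_b = (pow_a * xb + pow_b * xa + pow_b * xb) % 2
--         pow_a, pow_b = new_a, new_b
--     return val_a, val_b
-- ===== SOURCE B (Python) =====
-- def _count_Fp2_char2(f_coeffs, h_coeffs):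
--     """Count points over GF(4) for p=2, closed-form per-x solution count.
--
--     For each x: y^2 + h(x)y = f(x).  If h(x)=0 there is exactly one root
--     (Frobenius is bijective); otherwise substituting y = h*z gives
--     z^2 + z = u with u = f/h^2 = f*h (since h^3 = 1 for h != 0), which has
--     2 roots iff Tr(u) = 0, i.e. the w-component of f*h is 0.
--     Polynomials are evaluated by Horner's rule over reversed coefficients.
--     """
--     def mul(p, q):
--         pa, pb = p
--         qa, qb = q
--         return ((pa * qa + pb * qb) % 2, (pa * qb + pb * qa + pb * qb) % 2)
--
--     def ev(coeffs, x):
--         v = (0, 0)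
--         for c in reversed(coeffs):
--             v = mul(v, x)
--             v = ((v[0] + c) % 2, v[1])
--         return v
--
--     count = 0
--     for x in [(0, 0), (0, 1), (1, 0), (1, 1)]:
--         fx = ev(f_coeffs, x)
--         hx = ev(h_coeffs, x) if h_coeffs else (0, 0)
--         if hx == (0, 0):
--             count += 1
--         elif mul(fx, hx)[1] == 0:
--             count += 2
--
--     deg = -1
--     for i, c in enumerate(f_coeffs):
--         if c != 0:
--             deg = i
--     if deg == 5:
--         count += 1
--     elif deg == 6:
--         count += 2
--     return count
-- ===== Notes on version B (the rewrite author's own statement) =====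
-- stated objective: simpler
-- what changed: B replaces A's brute-force 4-element inner y-loop by the closed-form count of roots of y^2+h(x)y=f(x) in GF(4) (1 when h(x)=0, else 2 or 0 by the trace of f(x)*h(x)), evaluates polynomials by Horner's rule instead of maintaining ascending powers, and finds the polynomial degree with a forward scan instead of A's downward while loop.
import Mathlib
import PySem

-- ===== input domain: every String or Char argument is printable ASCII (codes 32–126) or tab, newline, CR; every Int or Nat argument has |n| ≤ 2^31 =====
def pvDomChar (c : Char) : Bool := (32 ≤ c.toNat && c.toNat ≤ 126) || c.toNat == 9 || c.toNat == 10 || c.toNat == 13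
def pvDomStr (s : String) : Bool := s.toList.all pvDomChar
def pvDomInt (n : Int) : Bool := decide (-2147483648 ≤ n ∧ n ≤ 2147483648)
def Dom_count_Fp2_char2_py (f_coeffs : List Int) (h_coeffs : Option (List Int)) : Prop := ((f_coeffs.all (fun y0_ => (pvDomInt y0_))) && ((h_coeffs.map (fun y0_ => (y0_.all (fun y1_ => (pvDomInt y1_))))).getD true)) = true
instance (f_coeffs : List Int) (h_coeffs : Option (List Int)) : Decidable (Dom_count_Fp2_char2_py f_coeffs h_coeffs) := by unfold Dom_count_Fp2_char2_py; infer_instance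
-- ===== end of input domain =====

-- B replaces A's 4-element inner y-loop by the closed-form GF(4) solution count of
-- y^2 + h(x)y = f(x) (1 root when h(x)=0, else 2 or 0 by the trace of f*h), evaluates
-- polynomials by Horner's rule, and finds the degree by a forward scan: simpler, same cost.


-- the literal element list [(a,b) for a in range(2) for b in range(2)] used by both Pythons
def pvElems : List (Int × Int) := [(0,0),(0,1),(1,0),(1,1)]

-- ===== PORT A =====
-- one step of the loop in _eval_poly_GF4 (state = ((val_a,val_b),(pow_a,pow_b)))
def pvStepEval (xa xb : Int) (st : (Int × Int) × (Int × Int)) (c : Int) : (Int × Int) × (Int × Int) :=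
  let c2 := PySem.Int.mod c 2
  ((PySem.Int.mod (st.1.1 + c2 * st.2.1) 2, PySem.Int.mod (st.1.2 + c2 * st.2.2) 2),
   (PySem.Int.mod (st.2.1 * xa + st.2.2 * xb) 2,
    PySem.Int.mod (st.2.1 * xb + st.2.2 * xa + st.2.2 * xb) 2))

def evalPolyGF4 (coeffs : List Int) (xa xb : Int) : Int × Int :=
  (coeffs.foldl (pvStepEval xa xb) ((0,0),(1,0))).1

-- the body of A's outer x-loop (contains the inner y-loop verbatim)
def pvStepA (f_coeffs : List Int) (h_coeffs : Option (List Int)) (cnt : Int) (x : Int × Int) : Int :=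
  let fx := evalPolyGF4 f_coeffs x.1 x.2
  let hx := match h_coeffs with
    | some hs => if hs = [] then ((0:Int),(0:Int)) else evalPolyGF4 hs x.1 x.2
    | none => ((0:Int),(0:Int))
  pvElems.foldl (fun c y =>
    let y2a := PySem.Int.mod (y.1 + y.2) 2
    let y2b := y.2
    let hya := PySem.Int.mod (hx.1 * y.1 + hx.2 * y.2) 2
    let hyb := PySem.Int.mod (hx.1 * y.2 + hx.2 * y.1 + hx.2 * y.2) 2
    if PySem.Int.mod (y2a + hya + fx.1) 2 = 0 ∧ PySem.Int.mod (y2b + hyb + fx.2) 2 = 0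
    then c + 1 else c) cnt

-- A's 'while deg_f >= 0 and f_coeffs[deg_f] == 0: deg_f -= 1', fuel = deg_f + 1.
-- Indices are always in range for nonempty f (getD never sees its default);
-- for f = [] Python raises IndexError (excluded by Pre_).
def pvDegWhileA (f : List Int) : Nat → Int
  | 0 => -1
  | d+1 => if f.getD d 0 = 0 then pvDegWhileA f d else (d : Int)

def count_Fp2_char2_py (f_coeffs : List Int) (h_coeffs : Option (List Int)) : Int :=
  let count := pvElems.foldl (pvStepA f_coeffs h_coeffs) 0
  let deg := pvDegWhileA f_coeffs f_coeffs.length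
  if deg = 5 then count + 1 else if deg = 6 then count + 2 else count

-- ===== PORT B =====
def pvGf4mul (p q : Int × Int) : Int × Int :=
  (PySem.Int.mod (p.1 * q.1 + p.2 * q.2) 2,
   PySem.Int.mod (p.1 * q.2 + p.2 * q.1 + p.2 * q.2) 2)

-- B's ev: Horner's rule, 'for c in reversed(coeffs)'
def pvEvHorner (coeffs : List Int) (x : Int × Int) : Int × Int :=
  coeffs.reverse.foldl (fun v c =>
    let v1 := pvGf4mul v x
    (PySem.Int.mod (v1.1 + c) 2, v1.2)) (0,0)

-- the body of B's x-loop: closed-form solution count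
def pvStepB (f_coeffs : List Int) (h_coeffs : Option (List Int)) (cnt : Int) (x : Int × Int) : Int :=
  let fx := pvEvHorner f_coeffs x
  let hx := match h_coeffs with
    | some hs => if hs = [] then ((0:Int),(0:Int)) else pvEvHorner hs x
    | none => ((0:Int),(0:Int))
  if hx = (0,0) then cnt + 1
  else if (pvGf4mul fx hx).2 = 0 then cnt + 2 else cnt

def count_Fp2_char2_py_alt (f_coeffs : List Int) (h_coeffs : Option (List Int)) : Int :=
  let count := pvElems.foldl (pvStepB f_coeffs h_coeffs) 0
  let deg := (PySem.List.enumerate f_coeffs 0).foldl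
    (fun d (p : Int × Int) => if p.2 ≠ 0 then p.1 else d) (-1)
  if deg = 5 then count + 1 else if deg = 6 then count + 2 else count

-- ===== PRECONDITION & SPEC =====
-- Pre_ excludes only empty f_coeffs, on which A raises IndexError (f_coeffs[0] in the degree loop).
def Pre_count_Fp2_char2_py (f_coeffs : List Int) (h_coeffs : Option (List Int)) : Prop := f_coeffs ≠ []
instance (f_coeffs : List Int) (h_coeffs : Option (List Int)) : Decidable (Pre_count_Fp2_char2_py f_coeffs h_coeffs) := by unfold Pre_count_Fp2_char2_py; infer_instance
def pvWitness_count_Fp2_char2_py : List Int × Option (List Int) := ([1, 0, 1], some [1])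

def Spec_count_Fp2_char2_py (f_coeffs : List Int) (h_coeffs : Option (List Int)) (out : Int) : Prop := out = count_Fp2_char2_py_alt f_coeffs h_coeffs
instance (f_coeffs : List Int) (h_coeffs : Option (List Int)) (out : Int) : Decidable (Spec_count_Fp2_char2_py f_coeffs h_coeffs out) := by unfold Spec_count_Fp2_char2_py; infer_instance

-- ===== CLAIM (what is proved, stated in full; the proofs are below) =====
def Claim_equal_count_Fp2_char2_py : Prop := ∀ (f_coeffs : List Int) (h_coeffs : Option (List Int)), Dom_count_Fp2_char2_py f_coeffs h_coeffs → Pre_count_Fp2_char2_py f_coeffs h_coeffs → Spec_count_Fp2_char2_py f_coeffs h_coeffs (count_Fp2_char2_py f_coeffs h_coeffs)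

-- ===== LEMMAS AND PROOFS =====

-- a GF(4) element in normalized coordinates: both components are 0 or 1
def pvNorm (p : Int × Int) : Prop := (p.1 = 0 ∨ p.1 = 1) ∧ (p.2 = 0 ∨ p.2 = 1)

-- componentwise addition mod 2 (GF(4) addition on normalized pairs)
def pvAdd2 (u v : Int × Int) : Int × Int :=
  (PySem.Int.mod (u.1 + v.1) 2, PySem.Int.mod (u.2 + v.2) 2)

theorem pvMod2_norm (a : Int) : PySem.Int.mod a 2 = 0 ∨ PySem.Int.mod a 2 = 1 := by
  have h1 := PySem.Int.mod_nonneg a (b := 2) (by omega)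
  have h2 := PySem.Int.mod_lt a (b := 2) (by omega)
  omega

theorem pvMod2_add_right (a c : Int) :
    PySem.Int.mod (a + c) 2 = PySem.Int.mod (a + PySem.Int.mod c 2) 2 := by
  simp only [PySem.Int.mod_eq_emod_of_pos (b := 2) (by norm_num)]
  omega

theorem pvEvHorner_cons (c : Int) (cs : List Int) (x : Int × Int) :
    pvEvHorner (c :: cs) x =
      (PySem.Int.mod ((pvGf4mul (pvEvHorner cs x) x).1 + c) 2, (pvGf4mul (pvEvHorner cs x) x).2) := by
  simp [pvEvHorner, List.foldl_append]

theorem pvEvHorner_norm (cs : List Int) (x : Int × Int) : pvNorm (pvEvHorner cs x) := by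
  cases cs with
  | nil => exact ⟨Or.inl rfl, Or.inl rfl⟩
  | cons c cs =>
    rw [pvEvHorner_cons]
    exact ⟨pvMod2_norm _, pvMod2_norm _⟩

-- core step identity of the two evaluators, on normalized operands
theorem pvStep_key (v p x e : Int × Int) (c : Int)
    (hv : pvNorm v) (hp : pvNorm p) (hx : pvNorm x) (he : pvNorm e) :
    pvAdd2 ((pvStepEval x.1 x.2 (v, p) c).1)
        (pvGf4mul ((pvStepEval x.1 x.2 (v, p) c).2) e)
      = pvAdd2 v (pvGf4mul p
          (PySem.Int.mod ((pvGf4mul e x).1 + c) 2, (pvGf4mul e x).2)) := by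
  obtain ⟨va, vb⟩ := v; obtain ⟨pa, pb⟩ := p; obtain ⟨xa, xb⟩ := x; obtain ⟨ea, eb⟩ := e
  obtain ⟨hv1, hv2⟩ := hv; obtain ⟨hp1, hp2⟩ := hp; obtain ⟨hx1, hx2⟩ := hx; obtain ⟨he1, he2⟩ := he
  have hc := pvMod2_norm c
  rw [pvMod2_add_right ((pvGf4mul (ea, eb) (xa, xb)).1) c]
  simp only [pvStepEval, pvAdd2, pvGf4mul]
  rcases hc with hc | hc <;> rw [hc] <;>
    rcases hv1 with rfl | rfl <;> rcases hv2 with rfl | rfl <;>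
    rcases hp1 with rfl | rfl <;> rcases hp2 with rfl | rfl <;>
    rcases hx1 with rfl | rfl <;> rcases hx2 with rfl | rfl <;>
    rcases he1 with rfl | rfl <;> rcases he2 with rfl | rfl <;> decide

theorem pvFoldA_eq (cs : List Int) (v p x : Int × Int)
    (hv : pvNorm v) (hp : pvNorm p) (hx : pvNorm x) :
    (cs.foldl (pvStepEval x.1 x.2) (v, p)).1 = pvAdd2 v (pvGf4mul p (pvEvHorner cs x)) := by
  induction cs generalizing v p with
  | nil =>
    obtain ⟨va, vb⟩ := v; obtain ⟨pa, pb⟩ := p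
    obtain ⟨hv1, hv2⟩ := hv; obtain ⟨hp1, hp2⟩ := hp
    simp only [List.foldl_nil, pvEvHorner, List.reverse_nil, pvAdd2, pvGf4mul]
    rcases hv1 with rfl | rfl <;> rcases hv2 with rfl | rfl <;>
      rcases hp1 with rfl | rfl <;> rcases hp2 with rfl | rfl <;> decide
  | cons c cs ih =>
    rw [List.foldl_cons, pvEvHorner_cons]
    have hst : pvStepEval x.1 x.2 (v, p) c =
        ((pvStepEval x.1 x.2 (v, p) c).1, (pvStepEval x.1 x.2 (v, p) c).2) := rfl
    rw [hst, ih _ _ ⟨pvMod2_norm _, pvMod2_norm _⟩ ⟨pvMod2_norm _, pvMod2_norm _⟩]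
    exact pvStep_key v p x (pvEvHorner cs x) c hv hp hx (pvEvHorner_norm cs x)

theorem pvEval_eq (cs : List Int) (x : Int × Int) (hx : pvNorm x) :
    evalPolyGF4 cs x.1 x.2 = pvEvHorner cs x := by
  rw [evalPolyGF4, pvFoldA_eq cs (0,0) (1,0) x ⟨Or.inl rfl, Or.inl rfl⟩ ⟨Or.inr rfl, Or.inl rfl⟩ hx]
  have he := pvEvHorner_norm cs x
  generalize pvEvHorner cs x = e at he ⊢
  obtain ⟨ea, eb⟩ := e
  obtain ⟨e1, e2⟩ := he
  simp only [pvAdd2, pvGf4mul]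
  rcases e1 with rfl | rfl <;> rcases e2 with rfl | rfl <;> decide

-- A's 16-case inner y-loop equals B's closed-form count, for normalized fx, hx
theorem pvInner_closed (F H : Int × Int) (hF : pvNorm F) (hH : pvNorm H) (cnt : Int) :
    pvElems.foldl (fun c y =>
      let y2a := PySem.Int.mod (y.1 + y.2) 2
      let y2b := y.2
      let hya := PySem.Int.mod (H.1 * y.1 + H.2 * y.2) 2
      let hyb := PySem.Int.mod (H.1 * y.2 + H.2 * y.1 + H.2 * y.2) 2
      if PySem.Int.mod (y2a + hya + F.1) 2 = 0 ∧ PySem.Int.mod (y2b + hyb + F.2) 2 = 0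
      then c + 1 else c) cnt
    = (if H = (0,0) then cnt + 1 else if (pvGf4mul F H).2 = 0 then cnt + 2 else cnt) := by
  obtain ⟨fa, fb⟩ := F; obtain ⟨ha, hb⟩ := H
  obtain ⟨hF1, hF2⟩ := hF; obtain ⟨hH1, hH2⟩ := hH
  rcases hF1 with rfl | rfl <;> rcases hF2 with rfl | rfl <;>
    rcases hH1 with rfl | rfl <;> rcases hH2 with rfl | rfl <;>
    simp [pvElems, pvGf4mul, PySem.Int.mod] <;> omega

theorem pvStep_eq (f : List Int) (h : Option (List Int)) (cnt : Int) (x : Int × Int)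
    (hx : pvNorm x) : pvStepA f h cnt x = pvStepB f h cnt x := by
  unfold pvStepA pvStepB
  rw [pvEval_eq f x hx]
  cases h with
  | none => exact pvInner_closed _ _ (pvEvHorner_norm f x) ⟨Or.inl rfl, Or.inl rfl⟩ cnt
  | some hs =>
    by_cases hhs : hs = []
    · subst hhs
      dsimp only
      exact pvInner_closed _ _ (pvEvHorner_norm f x) ⟨Or.inl rfl, Or.inl rfl⟩ cnt
    · dsimp only
      rw [if_neg hhs, if_neg hhs, pvEval_eq hs x hx]
      exact pvInner_closed _ _ (pvEvHorner_norm f x) (pvEvHorner_norm hs x) cnt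

-- A's downward while-scan ignores a trailing element it never reaches
theorem pvDegWhileA_append (f : List Int) (c : Int) (d : Nat) (hd : d ≤ f.length) :
    pvDegWhileA (f ++ [c]) d = pvDegWhileA f d := by
  induction d with
  | zero => rfl
  | succ d ih =>
    simp only [pvDegWhileA]
    rw [List.getD_eq_getElem?_getD, List.getElem?_append_left (by omega),
      ← List.getD_eq_getElem?_getD, ih (by omega)]

-- both degree computations find the last index with a nonzero coefficient
theorem pvDeg_eq (f : List Int) :
    pvDegWhileA f f.length =
      (PySem.List.enumerate f 0).foldl (fun d (p : Int × Int) => if p.2 ≠ 0 then p.1 else d) (-1) := by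
  induction f using List.reverseRecOn with
  | nil => rfl
  | append_singleton f c ih =>
    rw [PySem.List.enumerate_append, List.foldl_append]
    simp only [PySem.List.enumerate_cons, PySem.List.enumerate_nil, List.foldl_cons, List.foldl_nil]
    have hlen : (f ++ [c]).length = f.length + 1 := by simp
    rw [hlen]
    simp only [pvDegWhileA]
    rw [List.getD_eq_getElem?_getD, List.getElem?_concat_length]
    simp only [Option.getD_some]
    by_cases hc : c = 0
    · rw [if_pos hc, pvDegWhileA_append f c f.length (le_refl _), ih]
      simp [hc]
    · rw [if_neg hc]
      simp [hc]

-- ===== VERDICT (by name: the statement is the Claim_ definition above) =====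
theorem count_Fp2_char2_py_spec : Claim_equal_count_Fp2_char2_py := by
  intro f h _ _
  unfold Spec_count_Fp2_char2_py count_Fp2_char2_py count_Fp2_char2_py_alt
  dsimp only
  have hfold : List.foldl (pvStepA f h) 0 pvElems = List.foldl (pvStepB f h) 0 pvElems := by
    refine PySem.List.foldl_congr_mem pvElems (pvStepA f h) (pvStepB f h) 0 ?_
    intro acc x hx
    refine pvStep_eq f h acc x ?_
    fin_cases hx <;> exact ⟨by decide, by decide⟩
  rw [hfold, pvDeg_eq]
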